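-- pv_equiv track=rewrite | github.com/slotrust/AegixChain_SOC | src/backend/sensors/sensor_daemon.py | check_critical
-- ===== SOURCE A (Python) =====
-- def check_critical(file_path):
--     is_critical = any(file_path.startswith(d) for d in ['/etc/', '/bin/', '/sbin/'])
--     is_suspicious_ext = file_path.endswith('.sh') or file_path.endswith('.py') or file_path.endswith('.exe') or file_path.endswith('.bin') or file_path.endswith('.elf')
--
--     severity = 3
--     mitre = ""
--
--     if is_suspicious_ext:
--         severity = 6
--         mitre = "T1105" # Ingress Tool Transfer
--
--     if is_critical:
--         severity = max(severity, 8)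
--         mitre = "T1543" # Create or Modify System Process
--
--     if is_critical and is_suspicious_ext:
--         severity = 10
--
--     return severity, mitre
-- ===== SOURCE B (Python) =====
-- CRITICAL_DIRS = ('/etc/', '/bin/', '/sbin/')
-- SUSPICIOUS_EXTS = ('.sh', '.py', '.exe', '.bin', '.elf')
--
-- # Rules scanned top-down, most specific first; each is
-- # (required prefixes or None, required extensions or None, severity, mitre).
-- RULES = [
--     (CRITICAL_DIRS, SUSPICIOUS_EXTS, 10, 'T1543'),
--     (CRITICAL_DIRS, None,            8,  'T1543'),
--     (None,          SUSPICIOUS_EXTS, 6,  'T1105'),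
-- ]
--
-- def check_critical(file_path):
--     for prefixes, exts, severity, mitre in RULES:
--         if (prefixes is None or file_path.startswith(prefixes)) and \
--            (exts is None or file_path.endswith(exts)):
--             return severity, mitre
--     return 3, ''
-- ===== Notes on version B (the rewrite author's own statement) =====
-- stated objective: alternative
-- what changed: Replaced the mutating if-cascade (with max() and late overrides) by a first-match scan over an ordered rule list, most specific rule first, each rule pairing optional prefix/extension requirements with its final (severity, mitre); the default falls out after the loop instead of being re-assigned.
import Mathlib
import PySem

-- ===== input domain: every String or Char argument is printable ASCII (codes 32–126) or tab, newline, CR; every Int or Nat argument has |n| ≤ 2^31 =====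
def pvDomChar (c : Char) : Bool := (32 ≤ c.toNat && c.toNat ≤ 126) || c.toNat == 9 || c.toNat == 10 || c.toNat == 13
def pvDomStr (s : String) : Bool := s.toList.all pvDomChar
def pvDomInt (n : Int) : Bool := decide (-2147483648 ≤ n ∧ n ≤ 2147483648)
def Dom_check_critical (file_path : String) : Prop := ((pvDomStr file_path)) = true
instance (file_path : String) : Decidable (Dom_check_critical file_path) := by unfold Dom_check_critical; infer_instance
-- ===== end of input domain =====

-- B replaces A's mutating if-cascade by a first-match scan of an ordered rule list (objective: alternative).

-- ===== PORT A =====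
def check_critical (file_path : String) : Int × String :=
  let is_critical := ["/etc/", "/bin/", "/sbin/"].any (fun d => PySem.Str.startswith file_path d)
  let is_suspicious_ext :=
    PySem.Str.endswith file_path ".sh" || PySem.Str.endswith file_path ".py" ||
    PySem.Str.endswith file_path ".exe" || PySem.Str.endswith file_path ".bin" ||
    PySem.Str.endswith file_path ".elf"
  let severity : Int := 3
  let mitre : String := ""
  let severity := if is_suspicious_ext then 6 else severity
  let mitre := if is_suspicious_ext then "T1105" else mitre
  let severity := if is_critical then max severity 8 else severity
  let mitre := if is_critical then "T1543" else mitre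
  let severity := if is_critical && is_suspicious_ext then 10 else severity
  (severity, mitre)

-- ===== PORT B =====
def pvRules : List (Option (List String) × Option (List String) × Int × String) :=
  [ (some ["/etc/", "/bin/", "/sbin/"], some [".sh", ".py", ".exe", ".bin", ".elf"], 10, "T1543"),
    (some ["/etc/", "/bin/", "/sbin/"], none,                                        8,  "T1543"),
    (none,                              some [".sh", ".py", ".exe", ".bin", ".elf"], 6,  "T1105") ]

-- first-match loop over the rule list; falling off the end gives the default (3, "")
def pvRuleLoop (file_path : String) :
    List (Option (List String) × Option (List String) × Int × String) → Int × String
  | [] => (3, "")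
  | (prefixes, exts, severity, mitre) :: rest =>
    if ((match prefixes with
          | none => true
          | some ps => ps.any (fun p => PySem.Str.startswith file_path p)) &&
        (match exts with
          | none => true
          | some es => es.any (fun e => PySem.Str.endswith file_path e))) then
      (severity, mitre)
    else
      pvRuleLoop file_path rest

def check_critical_alt (file_path : String) : Int × String :=
  pvRuleLoop file_path pvRules

-- ===== PRECONDITION & SPEC =====
def Spec_check_critical (file_path : String) (out : Int × String) : Prop := out = check_critical_alt file_path
instance (file_path : String) (out : Int × String) : Decidable (Spec_check_critical file_path out) := by unfold Spec_check_critical; infer_instance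

-- ===== CLAIM (what is proved, stated in full; the proofs are below) =====
def Claim_equal_check_critical : Prop := ∀ (file_path : String), Dom_check_critical file_path → Spec_check_critical file_path (check_critical file_path)

-- ===== LEMMAS AND PROOFS =====

-- ===== VERDICT (by name: the statement is the Claim_ definition above) =====
theorem check_critical_spec : Claim_equal_check_critical := by
  intro fp _
  unfold Spec_check_critical check_critical check_critical_alt pvRules
  simp only [pvRuleLoop, List.any_cons, List.any_nil, Bool.or_false]
  generalize PySem.Str.startswith fp "/etc/" = b1
  generalize PySem.Str.startswith fp "/bin/" = b2
  generalize PySem.Str.startswith fp "/sbin/" = b3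
  generalize PySem.Str.endswith fp ".sh" = e1
  generalize PySem.Str.endswith fp ".py" = e2
  generalize PySem.Str.endswith fp ".exe" = e3
  generalize PySem.Str.endswith fp ".bin" = e4
  generalize PySem.Str.endswith fp ".elf" = e5
  revert b1 b2 b3 e1 e2 e3 e4 e5
  decide
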